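-- pv_equiv track=rewrite | github.com/shrestho0/ProblemSolving | Contest/Bracu/I.py | magic_wands
-- ===== SOURCE A (Python) =====
-- def magic_wands(N, K, power_list):
--     disteb_list = power_list.copy()
--     if K == 0: return 0
--     if N < 2: return 0
--     if N == 2:
--         if abs(power_list[0] - power_list[-1]) > K: return 1
--         else: return 0
--     for disteb in power_list:
--         if max(disteb_list) - min(disteb_list) > K:
--             disteb_list.remove(disteb)
--
--     if len(disteb_list) == len(power_list): return 0
--     else: return len(disteb_list)
-- ===== SOURCE B (Python) =====
-- def magic_wands(N, K, power_list):
--     # single backward pass with running min/max instead of repeated full-list max/min scans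
--     if K == 0:
--         return 0
--     if N < 2:
--         return 0
--     if N == 2:
--         return 1 if abs(power_list[0] - power_list[-1]) > K else 0
--     m = 0  # length of the longest suffix whose spread is <= K
--     lo = hi = None
--     for x in reversed(power_list):
--         lo = x if lo is None or x < lo else lo
--         hi = x if hi is None or x > hi else hi
--         if hi - lo <= K:
--             m += 1
--     return 0 if m == len(power_list) else m
-- ===== Notes on version B (the rewrite author's own statement) =====
-- stated objective: faster
-- what changed: A repeatedly rescans the whole remaining list with max()/min() while removing prefix elements; B makes a single backward pass maintaining running min/max to find the longest suffix whose spread is <= K.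
import Mathlib
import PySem

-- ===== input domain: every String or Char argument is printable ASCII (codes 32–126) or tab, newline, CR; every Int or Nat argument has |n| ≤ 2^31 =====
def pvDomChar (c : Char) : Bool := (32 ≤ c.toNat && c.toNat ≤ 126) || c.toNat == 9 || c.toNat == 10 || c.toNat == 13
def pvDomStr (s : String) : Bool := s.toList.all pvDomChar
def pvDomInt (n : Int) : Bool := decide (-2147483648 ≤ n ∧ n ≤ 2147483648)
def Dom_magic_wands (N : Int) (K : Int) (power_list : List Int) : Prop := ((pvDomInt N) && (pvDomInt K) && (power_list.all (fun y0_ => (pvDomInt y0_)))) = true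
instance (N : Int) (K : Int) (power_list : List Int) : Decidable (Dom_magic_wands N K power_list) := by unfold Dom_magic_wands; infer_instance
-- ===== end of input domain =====

-- B replaces A's quadratic remove-while-spread-exceeds-K loop (full max/min scan per step)
-- by one backward pass with running min/max (objective: faster, asymptotic).

-- ===== PORT A =====
-- one iteration of A's for-loop: if max(dl) - min(dl) > K: dl.remove(disteb)
-- (the `| _, _ => dl` arm is max()/min() of an empty list, unreachable: removals never
-- outpace iterations; the `.getD dl` is remove's ValueError, likewise unreachable here)
def aStep (K : Int) (dl : List Int) (x : Int) : List Int :=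
  match PySem.List.max? dl (fun y => y), PySem.List.min? dl (fun y => y) with
  | some M, some m => if M - m > K then (PySem.List.remove? dl x).getD dl else dl
  | _, _ => dl

def magic_wands (N : Int) (K : Int) (power_list : List Int) : Int :=
  if K = 0 then 0
  else if N < 2 then 0
  else if N = 2 then
    -- power_list[0] / power_list[-1]: IndexError on [] is excluded by Pre_
    match PySem.List.pyGet? power_list 0, PySem.List.pyGet? power_list (-1) with
    | some a, some b => if |a - b| > K then 1 else 0
    | _, _ => 0
  else
    let dl := power_list.foldl (aStep K) power_list
    if PySem.List.len dl = PySem.List.len power_list then 0 else PySem.List.len dl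

-- ===== PORT B =====
-- one iteration of B's backward loop; state = (m, lo, hi), lo/hi = None before the first element
def bStep (K : Int) (s : Int × Option Int × Option Int) (x : Int) : Int × Option Int × Option Int :=
  let lo : Int := match s.2.1 with | none => x | some l => if x < l then x else l
  let hi : Int := match s.2.2 with | none => x | some h => if x > h then x else h
  if hi - lo ≤ K then (s.1 + 1, some lo, some hi) else (s.1, some lo, some hi)

def magic_wands_alt (N : Int) (K : Int) (power_list : List Int) : Int :=
  if K = 0 then 0
  else if N < 2 then 0
  else if N = 2 then
    match PySem.List.pyGet? power_list 0, PySem.List.pyGet? power_list (-1) with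
    | some a, some b => if |a - b| > K then 1 else 0
    | _, _ => 0
  else
    let r := power_list.reverse.foldl (bStep K) (0, none, none)
    if r.1 = PySem.List.len power_list then 0 else r.1

-- ===== PRECONDITION & SPEC =====
-- A (and B) raise IndexError on power_list[0] when K ≠ 0, N = 2 and power_list = []; excluded.
def Pre_magic_wands (N : Int) (K : Int) (power_list : List Int) : Prop :=
  ¬ (K ≠ 0 ∧ N = 2 ∧ power_list = [])
instance (N : Int) (K : Int) (power_list : List Int) : Decidable (Pre_magic_wands N K power_list) := by unfold Pre_magic_wands; infer_instance

def pvWitness_magic_wands : Int × Int × List Int := (3, 1, [1, 5, 2, 3])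

def Spec_magic_wands (N : Int) (K : Int) (power_list : List Int) (out : Int) : Prop := out = magic_wands_alt N K power_list
instance (N : Int) (K : Int) (power_list : List Int) (out : Int) : Decidable (Spec_magic_wands N K power_list out) := by unfold Spec_magic_wands; infer_instance

-- ===== CLAIM (what is proved, stated in full; the proofs are below) =====
def Claim_equal_magic_wands : Prop := ∀ (N : Int) (K : Int) (power_list : List Int), Dom_magic_wands N K power_list → Pre_magic_wands N K power_list → Spec_magic_wands N K power_list (magic_wands N K power_list)

-- ===== LEMMAS AND PROOFS =====

-- length of the longest suffix of l whose spread (max - min) is ≤ K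
def gLen (K : Int) : List Int → Nat
  | [] => 0
  | x :: t => if t.foldl max x - t.foldl min x ≤ K then t.length + 1 else gLen K t

theorem gLen_le (K : Int) (l : List Int) : gLen K l ≤ l.length := by
  induction l with
  | nil => simp [gLen]
  | cons x t ih =>
    simp only [gLen]
    split
    · simp
    · exact Nat.le_succ_of_le ih

-- once the spread is ≤ K, A's loop never changes the list again
theorem foldl_aStep_of_le (K x : Int) (t : List Int)
    (h : t.foldl max x - t.foldl min x ≤ K) :
    ∀ rest, List.foldl (aStep K) (x :: t) rest = x :: t := by
  intro rest
  induction rest with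
  | nil => rfl
  | cons y r ih =>
    have hs : aStep K (x :: t) y = x :: t := by
      simp [aStep, PySem.List.max?_id_cons, PySem.List.min?_id_cons, not_lt.mpr h]
    simpa [List.foldl, hs] using ih

-- A's whole loop drops exactly the prefix before the longest good suffix
theorem A_loop (K : Int) (l : List Int) :
    List.foldl (aStep K) l l = l.drop (l.length - gLen K l) := by
  induction l with
  | nil => rfl
  | cons x t ih =>
    by_cases h : t.foldl max x - t.foldl min x ≤ K
    · have hstep : aStep K (x :: t) x = x :: t := by
        simp [aStep, PySem.List.max?_id_cons, PySem.List.min?_id_cons, not_lt.mpr h]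
      have : List.foldl (aStep K) (x :: t) (x :: t) = x :: t := by
        simpa [List.foldl, hstep] using foldl_aStep_of_le K x t h t
      rw [this, gLen, if_pos h]
      simp
    · have hstep : aStep K (x :: t) x = t := by
        simp [aStep, PySem.List.max?_id_cons, PySem.List.min?_id_cons, lt_of_not_ge h]
      have hg := gLen_le K t
      have : (x :: t).length - gLen K (x :: t) = (t.length - gLen K t) + 1 := by
        rw [gLen, if_neg h]; simp; omega
      rw [List.foldl, hstep, ih, this, List.drop_succ_cons]

-- running min/max of a nonempty list, as B maintains them
def foldMin? : List Int → Option Int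
  | [] => none
  | x :: t => some (t.foldl min x)

def foldMax? : List Int → Option Int
  | [] => none
  | x :: t => some (t.foldl max x)

theorem ite_lt_eq_min (x l : Int) : (if x < l then x else l) = min x l := by
  split <;> omega

theorem ite_gt_eq_max (x h : Int) : (if x > h then x else h) = max x h := by
  split <;> omega

-- B's backward pass (written as foldr) computes gLen and the running extrema
theorem B_loop (K : Int) (l : List Int) :
    List.foldr (fun x s => bStep K s x) ((0 : Int), (none : Option Int), (none : Option Int)) l
      = ((gLen K l : Int), foldMin? l, foldMax? l) := by
  induction l with
  | nil => rfl
  | cons x t ih =>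
    rw [List.foldr, ih]
    cases t with
    | nil =>
      simp only [bStep, foldMin?, foldMax?, gLen]
      by_cases h : (0 : Int) ≤ K
      · simp [h]
      · simp [h]
    | cons y t' =>
      have hmin : (if x < t'.foldl min y then x else t'.foldl min y) = t'.foldl min (min x y) := by
        rw [ite_lt_eq_min, List.foldl_assoc]
      have hmax : (if x > t'.foldl max y then x else t'.foldl max y) = t'.foldl max (max x y) := by
        rw [ite_gt_eq_max, List.foldl_assoc]
      simp only [bStep, foldMin?, foldMax?, hmin, hmax]
      by_cases h : t'.foldl max (max x y) - t'.foldl min (min x y) ≤ K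
      · -- good suffix grows: the tail was entirely good too
        have hmle : t'.foldl max y ≤ t'.foldl max (max x y) := by
          rw [List.foldl_assoc]; exact le_max_right _ _
        have hmge : t'.foldl min (min x y) ≤ t'.foldl min y := by
          rw [List.foldl_assoc]; exact min_le_right _ _
        have ht : t'.foldl max y - t'.foldl min y ≤ K := by omega
        have hgt : gLen K (y :: t') = t'.length + 1 := by rw [gLen, if_pos ht]
        have hgx : gLen K (x :: y :: t') = t'.length + 2 := by
          rw [gLen, if_pos (show List.foldl max x (y :: t') - List.foldl min x (y :: t') ≤ K from h)]
          simp
        rw [if_pos h, hgx, hgt]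
        simp only [Prod.mk.injEq]
        exact ⟨by push_cast; ring, rfl, rfl⟩
      · have hgx : gLen K (x :: y :: t') = gLen K (y :: t') := by
          rw [gLen, if_neg (show ¬ (List.foldl max x (y :: t') - List.foldl min x (y :: t') ≤ K) from h)]
        rw [if_neg h, hgx]
        rfl

-- ===== VERDICT (by name: the statement is the Claim_ definition above) =====
theorem magic_wands_spec : Claim_equal_magic_wands := by
  intro N K pl _ hpre
  unfold Spec_magic_wands magic_wands magic_wands_alt
  by_cases hK : K = 0
  · simp [hK]
  · rw [if_neg hK, if_neg hK]
    by_cases hN : N < 2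
    · simp [hN]
    · rw [if_neg hN, if_neg hN]
      by_cases hN2 : N = 2
      · simp [hN2]
      · rw [if_neg hN2, if_neg hN2]
        have hB : pl.reverse.foldl (bStep K) ((0 : Int), none, none)
            = ((gLen K pl : Int), foldMin? pl, foldMax? pl) := by
          rw [List.foldl_reverse]; exact B_loop K pl
        have hA : pl.foldl (aStep K) pl = pl.drop (pl.length - gLen K pl) := A_loop K pl
        have hg := gLen_le K pl
        simp only [hA, hB, PySem.List.len_eq, List.length_drop]
        rw [show pl.length - (pl.length - gLen K pl) = gLen K pl from by omega]
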